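-- pv_equiv track=rewrite | github.com/qwerty-loops/CodePath | Week_2/TUE_SP_1_SET_1/prob5.py | best_set
-- ===== SOURCE A (Python) =====
-- def best_set(votes):
--
--     hivote={}
--     for vote in votes.values():
--         if vote not in hivote:
--             hivote[vote]=1
--         else:
--             hivote[vote]+=1
--
--     for artist,votes in hivote.items():
--         if max(hivote.values()) == votes:
--             return artist
-- ===== SOURCE B (Python) =====
-- def best_set(votes):
--     counts = {}
--     for vote in votes.values():
--         counts[vote] = counts.get(vote, 0) + 1
--     ordered = sorted(counts.items(), key=lambda kv: kv[1], reverse=True)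
--     if not ordered:
--         return None
--     return ordered[0][0]
-- ===== Notes on version B (the rewrite author's own statement) =====
-- stated objective: alternative
-- what changed: A rescans for max(hivote.values()) on every iteration of the final loop; B sorts the (artist, count) items once by count descending with a stable sort and returns the head (stability preserves A's first-seen tie-break), with an explicit empty guard.
import Mathlib
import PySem

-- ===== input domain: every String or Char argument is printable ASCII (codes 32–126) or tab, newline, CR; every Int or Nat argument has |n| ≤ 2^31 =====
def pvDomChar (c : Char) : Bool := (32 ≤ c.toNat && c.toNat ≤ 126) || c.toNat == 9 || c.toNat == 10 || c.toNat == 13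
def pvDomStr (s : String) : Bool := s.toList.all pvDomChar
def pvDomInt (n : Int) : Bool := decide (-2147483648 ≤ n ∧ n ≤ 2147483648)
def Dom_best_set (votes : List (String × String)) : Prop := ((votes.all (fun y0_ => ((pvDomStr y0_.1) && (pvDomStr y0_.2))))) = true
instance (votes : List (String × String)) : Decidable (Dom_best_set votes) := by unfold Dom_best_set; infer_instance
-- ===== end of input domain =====

-- B replaces A's quadratic scan (max over all counts recomputed for every artist) by one
-- stable descending sort of the count items and taking its head; same first-seen tie-break.

-- ===== PORT A =====
-- the count-building loop body: `if vote not in hivote: hivote[vote]=1 else: hivote[vote]+=1`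
def bsCount (d : PySem.Dict String Int) (vote : String) : PySem.Dict String Int :=
  if d.contains vote = false then d.insert vote 1 else d.insert vote (d.getD vote 0 + 1)

-- the second loop with its early return; `max(hivote.values())` is re-evaluated each
-- iteration exactly as in A (the dict is unchanged inside the loop). max on an empty list
-- raises in Python and PySem.List.max? is none there; the loop body never runs in that case.
def bsScan (d : PySem.Dict String Int) : List (String × Int) → Option String
  | [] => none
  | p :: rest =>
      if PySem.List.max? d.values (fun x => x) = some p.2 then some p.1
      else bsScan d rest

def best_set (votes : List (String × String)) : Option String :=
  let hivote := ((PySem.Dict.ofList votes).values).foldl bsCount PySem.Dict.empty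
  bsScan hivote hivote.items

-- ===== PORT B =====
-- `if not ordered: return None` / `return ordered[0][0]`
def bsHead : List (String × Int) → Option String
  | [] => none
  | kv :: _ => some kv.1

def best_set_alt (votes : List (String × String)) : Option String :=
  let counts := ((PySem.Dict.ofList votes).values).foldl
      (fun d vote => d.insert vote (d.getD vote 0 + 1)) PySem.Dict.empty
  bsHead (PySem.List.sorted counts.items (fun kv => kv.2) true)

-- ===== PRECONDITION & SPEC =====
def Spec_best_set (votes : List (String × String)) (out : Option String) : Prop := out = best_set_alt votes
instance (votes : List (String × String)) (out : Option String) : Decidable (Spec_best_set votes out) := by unfold Spec_best_set; infer_instance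

-- ===== CLAIM (what is proved, stated in full; the proofs are below) =====
def Claim_equal_best_set : Prop := ∀ (votes : List (String × String)), Dom_best_set votes → Spec_best_set votes (best_set votes)

-- ===== LEMMAS AND PROOFS =====

-- the fold step of PySem.List.max? at key (·.2), named for the proofs
def mstep (o : Option (String × Int)) (x : String × Int) : Option (String × Int) :=
  match o with
  | none => some x
  | some m => if m.2 < x.2 then some x else some m

-- the fold step of PySem.List.max? at key id on Int
def istep (o : Option Int) (x : Int) : Option Int :=
  match o with
  | none => some x
  | some m => if m < x then some x else some m

theorem max?_eq_foldl_mstep (L : List (String × Int)) :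
    PySem.List.max? L (fun p => p.2) = L.foldl mstep none := by
  unfold PySem.List.max?
  congr 1
  funext o x
  cases o <;> rfl

theorem max?_id_eq_foldl_istep (L : List Int) :
    PySem.List.max? L (fun x => x) = L.foldl istep none := by
  unfold PySem.List.max?
  congr 1
  funext o x
  cases o <;> rfl

-- projecting the running max through (·.2)
theorem foldl_istep_map (L : List (String × Int)) :
    ∀ (o : Option (String × Int)),
      (L.map (fun p => p.2)).foldl istep (o.map (fun p => p.2)) =
        (L.foldl mstep o).map (fun p => p.2) := by
  induction L with
  | nil => intro o; rfl
  | cons x t ih =>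
      intro o
      have hstep : istep (o.map (fun p => p.2)) x.2 = (mstep o x).map (fun p => p.2) := by
        cases o with
        | none => rfl
        | some m => simp only [istep, mstep, Option.map_some]; split_ifs <;> rfl
      simpa [hstep] using ih (mstep o x)

-- head of the stable reverse sort = the running strict max (first maximal element)
theorem head_foldl_insertBy (L : List (String × Int)) :
    ∀ (acc : List (String × Int)),
      (L.foldl (fun acc x =>
          PySem.List.insertBy (fun a b => decide (b.2 < a.2)) x acc) acc).head? =
        L.foldl mstep acc.head? := by
  induction L with
  | nil => intro acc; rfl
  | cons x t ih =>
      intro acc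
      have hins : (PySem.List.insertBy (fun a b => decide (b.2 < a.2)) x acc).head? =
          mstep acc.head? x := by
        cases acc with
        | nil => rfl
        | cons y ys => by_cases h : y.2 < x.2 <;> simp [PySem.List.insertBy, mstep, h]
      simpa [hins] using ih (PySem.List.insertBy (fun a b => decide (b.2 < a.2)) x acc)

theorem head_sorted_rev (L : List (String × Int)) :
    (PySem.List.sorted L (fun kv => kv.2) true).head? = PySem.List.max? L (fun p => p.2) := by
  rw [PySem.List.sorted_rev_eq_foldl_insertBy, max?_eq_foldl_mstep]
  simpa using head_foldl_insertBy L []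

-- characterisation of the running max started at `some a`
theorem foldl_mstep_spec (t : List (String × Int)) :
    ∀ (a : String × Int), ∃ m, t.foldl mstep (some a) = some m ∧
      (∀ y ∈ t, y.2 ≤ m.2) ∧ a.2 ≤ m.2 ∧
      (m = a ∨ ∃ t1 t2, t = t1 ++ m :: t2 ∧ (∀ y ∈ t1, y.2 < m.2) ∧ a.2 < m.2) := by
  induction t with
  | nil => intro a; exact ⟨a, rfl, by simp, le_refl _, Or.inl rfl⟩
  | cons y t ih =>
      intro a
      by_cases hy : a.2 < y.2
      · obtain ⟨m, hm, hall, hle, hdec⟩ := ih y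
        refine ⟨m, ?_, ?_, ?_, ?_⟩
        · simpa [mstep, hy] using hm
        · intro z hz
          rcases List.mem_cons.mp hz with h | h
          · exact h ▸ hle
          · exact hall z h
        · omega
        · right
          rcases hdec with h | ⟨t1, t2, ht, hpre, hlt⟩
          · exact ⟨[], t, by simp [h], by simp, by omega⟩
          · refine ⟨y :: t1, t2, by simp [ht], ?_, by omega⟩
            intro z hz
            rcases List.mem_cons.mp hz with h | h
            · subst h; omega
            · exact hpre z h
      · obtain ⟨m, hm, hall, hle, hdec⟩ := ih a
        refine ⟨m, ?_, ?_, hle, ?_⟩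
        · simpa [mstep, hy] using hm
        · intro z hz
          rcases List.mem_cons.mp hz with h | h
          · subst h; omega
          · exact hall z h
        · rcases hdec with h | ⟨t1, t2, ht, hpre, hlt⟩
          · exact Or.inl h
          · refine Or.inr ⟨y :: t1, t2, by simp [ht], ?_, hlt⟩
            intro z hz
            rcases List.mem_cons.mp hz with h | h
            · subst h; omega
            · exact hpre z h

-- A's scan returns m when the prefix misses the max value and m carries it
theorem bsScan_prefix (d : PySem.Dict String Int) (c : Int)
    (hv : PySem.List.max? d.values (fun x => x) = some c) :
    ∀ (t1 : List (String × Int)), (∀ y ∈ t1, y.2 ≠ c) →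
      ∀ (m : String × Int), m.2 = c → ∀ (t2 : List (String × Int)),
        bsScan d (t1 ++ m :: t2) = some m.1 := by
  intro t1
  induction t1 with
  | nil => intro _ m hm t2; simp [bsScan, hv, hm]
  | cons y t1 ih =>
      intro h1 m hm t2
      have hy : y.2 ≠ c := h1 y (List.mem_cons_self)
      have : ¬ (PySem.List.max? d.values (fun x => x) = some y.2) := by
        rw [hv]; simp [Ne.symm hy]
      simp only [List.cons_append, bsScan, this, if_false]
      exact ih (fun z hz => h1 z (List.mem_cons_of_mem _ hz)) m hm t2

-- end-to-end on the items list of the counts dict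
theorem scan_eq_sorted_head (L : List (String × Int)) :
    bsScan ⟨L⟩ L = bsHead (PySem.List.sorted L (fun kv => kv.2) true) := by
  have hmatch : bsHead (PySem.List.sorted L (fun kv => kv.2) true) =
      (PySem.List.sorted L (fun kv => kv.2) true).head?.map (fun kv => kv.1) := by
    cases PySem.List.sorted L (fun kv => kv.2) true <;> rfl
  rw [hmatch, head_sorted_rev]
  cases L with
  | nil => rfl
  | cons x t =>
      obtain ⟨m, hm, hall, hle, hdec⟩ := foldl_mstep_spec t x
      have hmax : PySem.List.max? (x :: t) (fun p => p.2) = some m := by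
        rw [max?_eq_foldl_mstep]; simpa [mstep] using hm
      have hvals : PySem.List.max? (PySem.Dict.values ⟨x :: t⟩) (fun x => x) = some m.2 := by
        have : PySem.Dict.values (⟨x :: t⟩ : PySem.Dict String Int) =
            (x :: t).map (fun p => p.2) := rfl
        rw [this, max?_id_eq_foldl_istep]
        have := foldl_istep_map (x :: t) none
        simp only [Option.map_none] at this
        rw [this, ← max?_eq_foldl_mstep, hmax]
        rfl
      rw [hmax]
      rcases hdec with h | ⟨t1, t2, ht, hpre, hlt⟩
      · subst h
        show bsScan ⟨m :: t⟩ (m :: t) = some m.1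
        simp only [bsScan]
        rw [if_pos hvals]
      · have hL : x :: t = (x :: t1) ++ m :: t2 := by simp [ht]
        show bsScan ⟨x :: t⟩ (x :: t) = some m.1
        rw [hL]
        refine bsScan_prefix _ m.2 (by rw [← hL]; exact hvals) (x :: t1) ?_ m rfl t2
        intro y hy
        rcases List.mem_cons.mp hy with h | h
        · subst h; omega
        · have := hpre y h; omega

theorem scan_eq_sorted_head' (d : PySem.Dict String Int) :
    bsScan d d.items = bsHead (PySem.List.sorted d.items (fun kv => kv.2) true) := by
  obtain ⟨L⟩ := d
  exact scan_eq_sorted_head L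

-- the two count-building loop bodies agree
theorem bsCount_eq (d : PySem.Dict String Int) (v : String) :
    bsCount d v = d.insert v (d.getD v 0 + 1) := by
  by_cases h : d.contains v
  · simp [bsCount, h]
  · have h' : d.contains v = false := by simpa using h
    have h2 : ∀ (a : String) (b : Int), (a, b) ∈ d.items → ¬ a = v := by
      simpa [PySem.Dict.contains, List.any_eq_false] using h'
    have hfind : d.items.find? (fun p => p.1 == v) = none := by
      rw [List.find?_eq_none]
      intro p hp
      simpa using h2 p.1 p.2 hp
    have : d.getD v 0 = 0 := by
      simp [PySem.Dict.getD, PySem.Dict.get?, hfind]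
    simp [bsCount, h', this]

theorem foldl_count_eq (l : List String) :
    ∀ (d : PySem.Dict String Int),
      l.foldl bsCount d = l.foldl (fun d v => d.insert v (d.getD v 0 + 1)) d := by
  induction l with
  | nil => intro d; rfl
  | cons v l ih => intro d; simp only [List.foldl_cons, bsCount_eq]; exact ih _

-- ===== VERDICT (by name: the statement is the Claim_ definition above) =====
theorem best_set_spec : Claim_equal_best_set := by
  intro votes _
  unfold Spec_best_set best_set best_set_alt
  rw [foldl_count_eq]
  exact scan_eq_sorted_head'
    (((PySem.Dict.ofList votes).values).foldl
      (fun d v => d.insert v (d.getD v 0 + 1)) PySem.Dict.empty)
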